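-- pv_equiv track=rewrite | github.com/valeriacarballo/Practice-Algorithms | codepath.py | frequent_num
-- ===== SOURCE A (Python) =====
-- def frequent_num (arr: list, k: int):
--     if len(arr) == 0:
--         return []
--
--     # populating the dictionary
--     d = {}
--     for num in arr:
--         curr_val = d.get(num)
--
--         if curr_val != None:
--             #add 1 to the value
--             d[num] = d[num] + 1
--             continue
--
--         # setting num as key and value as 1 into the dict
--         d.setdefault(num, 1)
--
--     nums_k_times = []
--     for num in arr:
--         curr_val = d.get(num)
--         if curr_val == k:
--             nums_k_times.append(num)
--
--     return nums_k_times
-- ===== SOURCE B (Python) =====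
-- def frequent_num(arr: list, k: int):
--     s = sorted(arr)
--     keep = set()
--     i = 0
--     while i < len(s):
--         j = i + 1
--         while j < len(s) and s[j] == s[i]:
--             j += 1
--         if j - i == k:
--             keep.add(s[i])
--         i = j
--     return [x for x in arr if x in keep]
-- ===== Notes on version B (the rewrite author's own statement) =====
-- stated objective: alternative
-- what changed: Replaced the frequency dictionary with sort-then-run-scan: B sorts a copy, walks the sorted list run by run collecting values whose run length is exactly k into a set, then filters arr by set membership.
import Mathlib
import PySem

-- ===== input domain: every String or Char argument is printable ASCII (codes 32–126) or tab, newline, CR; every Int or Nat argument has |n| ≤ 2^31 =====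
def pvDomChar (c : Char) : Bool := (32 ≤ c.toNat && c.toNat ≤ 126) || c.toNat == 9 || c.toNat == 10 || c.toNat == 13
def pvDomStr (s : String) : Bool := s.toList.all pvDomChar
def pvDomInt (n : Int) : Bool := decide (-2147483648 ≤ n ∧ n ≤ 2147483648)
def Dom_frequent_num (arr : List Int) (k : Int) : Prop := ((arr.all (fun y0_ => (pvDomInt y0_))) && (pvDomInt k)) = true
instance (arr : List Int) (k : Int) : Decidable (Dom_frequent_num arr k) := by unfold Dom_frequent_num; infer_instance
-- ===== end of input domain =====

-- B replaces A's frequency dictionary with sort-then-run-scan: sort a copy, collect values whose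
-- run length is exactly k into a set, then filter arr by membership (alternative algorithm, not faster).


-- ===== PORT A =====
def frequent_num (arr : List Int) (k : Int) : List Int :=
  if arr.length = 0 then []
  else
    -- populating the dictionary
    let d := arr.foldl (fun d num =>
      match d.get? num with
      | some v => d.insert num (v + 1)      -- d[num] = d[num] + 1
      | none   => d.insert num 1)           -- d.setdefault(num, 1)
      (PySem.Dict.empty : PySem.Dict Int Int)
    -- second loop: collect nums with d.get(num) == k
    arr.foldl (fun nums_k_times num =>
      if d.get? num = some k then nums_k_times ++ [num] else nums_k_times) []

-- ===== PORT B =====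
-- the outer while loop of Source B: consume the sorted list one maximal run at a time;
-- advancing i to j is dropping the run (its length is 1 + takeWhile-length)
def keepRuns (k : Int) : List Int → PySem.Set Int → PySem.Set Int
  | [], keep => keep
  | x :: xs, keep =>
    let run : Nat := 1 + (xs.takeWhile (fun y => y == x)).length
    let rest := xs.dropWhile (fun y => y == x)
    keepRuns k rest (if (run : Int) = k then PySem.Set.add keep x else keep)
termination_by s _ => s.length
decreasing_by
  simpa using Nat.lt_succ_of_le (List.Sublist.length_le (List.dropWhile_sublist _))

def frequent_num_alt (arr : List Int) (k : Int) : List Int :=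
  let s := PySem.List.sorted arr (fun x => x) false
  let keep := keepRuns k s PySem.Set.empty
  arr.filter (fun x => PySem.Set.contains keep x)

-- ===== PRECONDITION & SPEC =====
def Spec_frequent_num (arr : List Int) (k : Int) (out : List Int) : Prop := out = frequent_num_alt arr k
instance (arr : List Int) (k : Int) (out : List Int) : Decidable (Spec_frequent_num arr k out) := by unfold Spec_frequent_num; infer_instance

-- ===== CLAIM (what is proved, stated in full; the proofs are below) =====
def Claim_equal_frequent_num : Prop := ∀ (arr : List Int) (k : Int), Dom_frequent_num arr k → Spec_frequent_num arr k (frequent_num arr k)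

-- ===== LEMMAS AND PROOFS =====

-- A's dict-population loop builds exactly the counter of arr
lemma fold_eq_counter (arr : List Int) :
    arr.foldl (fun d num =>
      match d.get? num with
      | some v => d.insert num (v + 1)
      | none   => d.insert num 1) (PySem.Dict.empty : PySem.Dict Int Int) = PySem.Dict.counter arr := by
  rw [show arr.foldl (fun d num =>
        match d.get? num with
        | some v => d.insert num (v + 1)
        | none   => d.insert num 1) (PySem.Dict.empty : PySem.Dict Int Int)
      = arr.foldl (fun d num => d.insert num (d.getD num 0 + 1)) (PySem.Dict.empty : PySem.Dict Int Int) from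
    PySem.List.foldl_congr_mem _ _ _ _ (by
      intro d x _
      rcases h : d.get? x with _ | v
      · simp [h, PySem.Dict.getD_eq_get?_getD]
      · simp [h, PySem.Dict.getD_eq_get?_getD])]
  exact PySem.Dict.foldl_insert_getD_add_one_eq_counter arr

lemma get?_counter_of_mem (arr : List Int) (x : Int) (hx : x ∈ arr) :
    (PySem.Dict.counter arr).get? x = some ((List.count x arr : Int)) := by
  have hc : (PySem.Dict.counter arr).contains x = true := by
    rw [PySem.Dict.contains_counter]; simpa using hx
  rw [PySem.Dict.contains_eq_isSome_get?] at hc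
  rcases h : (PySem.Dict.counter arr).get? x with _ | v
  · rw [h] at hc; simp at hc
  · have := PySem.Dict.getD_counter arr x
    rw [PySem.Dict.getD_eq_get?_getD, h] at this
    simp at this
    simp [this]

-- A collects exactly the elements of arr whose total count is k
lemma A_eq_filter (arr : List Int) (k : Int) :
    frequent_num arr k = arr.filter (fun x => decide ((List.count x arr : Int) = k)) := by
  unfold frequent_num
  rcases arr with _ | ⟨a, as⟩
  · simp
  · rw [if_neg (by simp)]
    rw [fold_eq_counter]
    rw [PySem.List.foldl_congr_mem (a :: as) _
      (fun nums_k_times num =>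
        if (List.count num (a :: as) : Int) = k then nums_k_times ++ [num] else nums_k_times) []
      (by
        intro acc x hx
        rw [get?_counter_of_mem (a :: as) x hx]
        simp)]
    rw [PySem.List.foldl_append_ite_eq_filter]
    simp

-- on a sorted list whose elements all dominate x, x does not survive dropWhile (== x)
lemma not_mem_dropWhile_sorted (x : Int) (xs : List Int)
    (hle : ∀ y ∈ xs, x ≤ y) (hp : xs.Pairwise (· ≤ ·)) :
    x ∉ xs.dropWhile (fun y => y == x) := by
  induction xs with
  | nil => simp
  | cons y ys ih =>
    rcases List.pairwise_cons.mp hp with ⟨hy, hys⟩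
    by_cases h : y = x
    · subst h
      rw [List.dropWhile_cons_of_pos (by simp)]
      exact ih (fun z hz => hle z (List.mem_cons_of_mem _ hz)) hys
    · rw [List.dropWhile_cons_of_neg (by simp [h])]
      intro hmem
      rcases List.mem_cons.mp hmem with h' | h'
      · exact h h'.symm
      · have h1 : y ≤ x := hy x h'
        have h2 : x ≤ y := hle y (List.mem_cons_self)
        exact h (le_antisymm h1 h2)

-- membership in keepRuns on a sorted list = old membership or count-k membership
lemma mem_keepRuns (k : Int) : ∀ (s : List Int) (keep : PySem.Set Int),
    s.Pairwise (· ≤ ·) → ∀ (x : Int),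
    (x ∈ keepRuns k s keep ↔ x ∈ keep ∨ (x ∈ s ∧ (List.count x s : Int) = k))
  | [], keep, _, x => by simp [keepRuns]
  | x0 :: xs, keep, hp, x => by
    rcases List.pairwise_cons.mp hp with ⟨hle, hptl⟩
    have hnot : x0 ∉ xs.dropWhile (fun y => y == x0) :=
      not_mem_dropWhile_sorted x0 xs hle hptl
    have hrestp : (xs.dropWhile (fun y => y == x0)).Pairwise (· ≤ ·) :=
      hptl.sublist (List.dropWhile_sublist _)
    have htw : ∀ y ∈ xs.takeWhile (fun y => y == x0), y = x0 := by
      intro y hy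
      have := List.mem_takeWhile_imp hy
      simpa using this
    have hsplit := List.takeWhile_append_dropWhile (p := fun y => y == x0) (l := xs)
    have hxs_count : List.count x0 xs
        = List.count x0 (xs.takeWhile (fun y => y == x0))
          + List.count x0 (xs.dropWhile (fun y => y == x0)) := by
      conv_lhs => rw [← hsplit]
      exact List.count_append ..
    have hcount0 : List.count x0 (x0 :: xs)
        = 1 + (xs.takeWhile (fun y => y == x0)).length := by
      rw [List.count_cons_self, hxs_count]
      have h1 : List.count x0 (xs.takeWhile (fun y => y == x0))
          = (xs.takeWhile (fun y => y == x0)).length :=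
        List.count_eq_length.mpr (fun b hb => (htw b hb).symm)
      have h2 : List.count x0 (xs.dropWhile (fun y => y == x0)) = 0 :=
        List.count_eq_zero.mpr hnot
      omega
    have ih := mem_keepRuns k (xs.dropWhile (fun y => y == x0))
      (if ((1 + (xs.takeWhile (fun y => y == x0)).length : Nat) : Int) = k
        then PySem.Set.add keep x0 else keep) hrestp x
    rw [show keepRuns k (x0 :: xs) keep
        = keepRuns k (xs.dropWhile (fun y => y == x0))
          (if ((1 + (xs.takeWhile (fun y => y == x0)).length : Nat) : Int) = k
            then PySem.Set.add keep x0 else keep) from by rw [keepRuns]]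
    rw [ih]
    by_cases hx : x = x0
    · subst hx
      by_cases hk : ((1 + (xs.takeWhile (fun y => y == x)).length : Nat) : Int) = k
      · rw [if_pos hk]
        constructor
        · intro _
          exact Or.inr ⟨List.mem_cons_self, by rw [hcount0]; exact_mod_cast hk⟩
        · intro _
          exact Or.inl ((PySem.Set.mem_add _ _ _).mpr (Or.inr rfl))
      · rw [if_neg hk]
        constructor
        · rintro (h | ⟨h, _⟩)
          · exact Or.inl h
          · exact absurd h hnot
        · rintro (h | ⟨_, hc⟩)
          · exact Or.inl h
          · exact absurd (by rw [hcount0] at hc; exact_mod_cast hc) hk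
    · have hcne : List.count x (x0 :: xs) = List.count x (xs.dropWhile (fun y => y == x0)) := by
        have hx' : ¬ x0 = x := fun h => hx h.symm
        have h1 : List.count x (x0 :: xs) = List.count x xs := by
          simp [hx']
        have h2 : List.count x xs
            = List.count x (xs.takeWhile (fun y => y == x0))
              + List.count x (xs.dropWhile (fun y => y == x0)) := by
          conv_lhs => rw [← hsplit]
          exact List.count_append ..
        have h3 : List.count x (xs.takeWhile (fun y => y == x0)) = 0 :=
          List.count_eq_zero.mpr (fun hmem => hx (htw x hmem))
        omega
      have hmne : (x ∈ x0 :: xs) ↔ x ∈ xs.dropWhile (fun y => y == x0) := by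
        rw [List.mem_cons]
        conv_lhs => rw [← hsplit]
        rw [List.mem_append]
        constructor
        · rintro (h | h | h)
          · exact absurd h hx
          · exact absurd (htw x h) hx
          · exact h
        · intro h; exact Or.inr (Or.inr h)
      have hkeep' : (x ∈ (if ((1 + (xs.takeWhile (fun y => y == x0)).length : Nat) : Int) = k
            then PySem.Set.add keep x0 else keep)) ↔ x ∈ keep := by
        split
        · rw [PySem.Set.mem_add]
          exact ⟨fun h => h.resolve_right hx, Or.inl⟩
        · exact Iff.rfl
      rw [hkeep', hcne, hmne]
  termination_by s _ => s.length
  decreasing_by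
    simpa using Nat.lt_succ_of_le (List.Sublist.length_le (List.dropWhile_sublist _))

-- ===== VERDICT (by name: the statement is the Claim_ definition above) =====
theorem frequent_num_spec : Claim_equal_frequent_num := by
  intro arr k _
  show frequent_num arr k = frequent_num_alt arr k
  rw [A_eq_filter]
  unfold frequent_num_alt
  apply List.filter_congr
  intro x hx
  have hp : (PySem.List.sorted arr (fun x => x) false).Pairwise (· ≤ ·) := by
    simpa using PySem.List.sorted_pairwise arr (fun x => x)
  have hm := mem_keepRuns k (PySem.List.sorted arr (fun x => x) false) PySem.Set.empty hp x
  have hcnt : List.count x (PySem.List.sorted arr (fun x => x) false) = List.count x arr :=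
    (PySem.List.sorted_perm arr (fun x => x) false).count_eq x
  have hmem : x ∈ PySem.List.sorted arr (fun x => x) false := by
    rw [PySem.List.mem_sorted]; exact hx
  simp only [PySem.Set.empty, List.not_mem_nil, false_or, hcnt, hmem, true_and] at hm
  by_cases hk : (List.count x arr : Int) = k
  · simp [hk, hm]
  · simp [hk, hm]
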